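-- pv_equiv track=rewrite | github.com/ishiahirake/leetcode | python/solutions/s0036_Valid_Sudoku.py | _is_valid_seq
-- ===== SOURCE A (Python) =====
-- from typing import List
--
-- def _is_valid_seq(seq: List[str]) -> bool:
--     s = set()
--     for c in seq:
--         if c != '.':
--             if c not in s:
--                 s.add(c)
--             else:
--                 return False
--     return True
-- ===== SOURCE B (Python) =====
-- from typing import List
--
-- def _is_valid_seq(seq: List[str]) -> bool:
--     vals = sorted(c for c in seq if c != '.')
--     return all(a != b for a, b in zip(vals, vals[1:]))
-- ===== Notes on version B (the rewrite author's own statement) =====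
-- stated objective: alternative
-- what changed: Replaces A's hash-set membership loop with sort-based duplicate detection: sort the non-'.' values and check that no two adjacent sorted elements are equal (duplicates are adjacent after sorting).
import Mathlib
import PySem

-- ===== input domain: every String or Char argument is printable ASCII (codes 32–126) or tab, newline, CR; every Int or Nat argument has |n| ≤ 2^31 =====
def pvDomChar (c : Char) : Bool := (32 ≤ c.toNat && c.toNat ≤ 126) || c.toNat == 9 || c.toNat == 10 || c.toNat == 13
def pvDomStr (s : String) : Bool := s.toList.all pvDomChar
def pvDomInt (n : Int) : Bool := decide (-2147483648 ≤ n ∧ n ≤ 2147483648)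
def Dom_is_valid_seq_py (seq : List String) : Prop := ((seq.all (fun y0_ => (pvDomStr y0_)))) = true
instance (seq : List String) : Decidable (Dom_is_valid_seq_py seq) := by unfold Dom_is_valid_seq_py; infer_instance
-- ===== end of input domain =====

-- B detects duplicates by sorting the non-'.' values and scanning adjacent pairs,
-- instead of A's incremental membership-set loop; objective: alternative algorithm.


-- ===== PORT A =====
-- the for-loop with its early 'return False', carrying the set s
def isValidLoopA : List String → PySem.Set String → Bool
  | [], _ => true
  | c :: rest, s =>
    if c ≠ "." then
      if ¬ PySem.Set.contains s c then isValidLoopA rest (PySem.Set.add s c)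
      else false
    else isValidLoopA rest s

def is_valid_seq_py (seq : List String) : Bool :=
  isValidLoopA seq PySem.Set.empty

-- ===== PORT B =====
def is_valid_seq_py_alt (seq : List String) : Bool :=
  let vals := PySem.List.sorted (seq.filter (fun c => c ≠ ".")) (fun x => x) false
  (vals.zip (vals.drop 1)).all (fun p => p.1 != p.2)

-- ===== PRECONDITION & SPEC =====
def Spec_is_valid_seq_py (seq : List String) (out : Bool) : Prop := out = is_valid_seq_py_alt seq
instance (seq : List String) (out : Bool) : Decidable (Spec_is_valid_seq_py seq out) := by unfold Spec_is_valid_seq_py; infer_instance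

-- ===== CLAIM (what is proved, stated in full; the proofs are below) =====
def Claim_equal_is_valid_seq_py : Prop := ∀ (seq : List String), Dom_is_valid_seq_py seq → Spec_is_valid_seq_py seq (is_valid_seq_py seq)

-- ===== LEMMAS AND PROOFS =====

-- A's loop succeeds iff the kept values are distinct and none is already in s
theorem isValidLoopA_iff (l : List String) (s : PySem.Set String) :
    isValidLoopA l s = true ↔
      ((l.filter (fun c => c ≠ ".")).Nodup ∧ ∀ c ∈ l.filter (fun c => c ≠ "."), c ∉ s) := by
  induction l generalizing s with
  | nil => simp [isValidLoopA]
  | cons c rest ih =>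
    by_cases hc : c = "."
    · simp [isValidLoopA, hc, ih]
    · have hf : (c :: rest).filter (fun c => c ≠ ".") =
          c :: rest.filter (fun c => c ≠ ".") := by
        simp [hc]
      by_cases hs : c ∈ s
      · simp only [isValidLoopA, hf]
        simp [hc, hs]
      · rw [show isValidLoopA (c :: rest) s = isValidLoopA rest (PySem.Set.add s c) by
              simp [isValidLoopA, hc, hs]]
        rw [ih, hf]
        simp only [List.nodup_cons, List.mem_cons, forall_eq_or_imp]
        constructor
        · rintro ⟨ndR, hm⟩
          refine ⟨⟨fun hcF => (hm c hcF ((PySem.Set.mem_add _ _ _).2 (Or.inr rfl))), ndR⟩,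
                  hs, fun x hx hxs => hm x hx ((PySem.Set.mem_add _ _ _).2 (Or.inl hxs))⟩
        · rintro ⟨⟨hcF, ndR⟩, _, hm⟩
          refine ⟨ndR, fun x hx h => ?_⟩
          rcases (PySem.Set.mem_add _ _ _).1 h with hxs | rfl
          · exact hm x hx hxs
          · exact hcF hx

-- the adjacent-pair scan computes IsChain (· ≠ ·)
theorem zip_tail_all_iff_chain' (l : List String) :
    ((l.zip (l.drop 1)).all (fun p => p.1 != p.2) = true) ↔ l.IsChain (· ≠ ·) := by
  induction l with
  | nil => simp
  | cons a t ih =>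
    cases t with
    | nil => simp
    | cons b u =>
      simp only [List.drop_succ_cons, List.drop_zero, List.zip_cons_cons, List.all_cons,
        Bool.and_eq_true, bne_iff_ne, List.isChain_cons_cons] at *
      exact and_congr Iff.rfl ih

-- on a ≤-sorted list, adjacent-distinct is the same as Nodup
theorem chain'_ne_iff_nodup_of_sorted (l : List String) (hle : l.Pairwise (· ≤ ·)) :
    l.IsChain (· ≠ ·) ↔ l.Nodup := by
  constructor
  · intro hch
    have hlt : l.IsChain (· < ·) := by
      have hadj := List.isChain_iff_pairwise.2 hle
      -- combine adjacent ≤ with adjacent ≠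
      induction l with
      | nil => exact List.isChain_nil
      | cons a t ih =>
        cases t with
        | nil => exact List.isChain_singleton a
        | cons b u =>
          rw [List.isChain_cons_cons] at hch hadj ⊢
          rcases hle with _ | ⟨hab, ht⟩
          exact ⟨lt_of_le_of_ne hadj.1 hch.1, ih ht hch.2 hadj.2⟩
    exact (List.isChain_iff_pairwise.1 hlt).imp ne_of_lt
  · intro hnd
    exact (hnd.imp (fun h => h)).isChain

-- ===== VERDICT (by name: the statement is the Claim_ definition above) =====
theorem is_valid_seq_py_spec : Claim_equal_is_valid_seq_py := by
  intro seq _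
  unfold Spec_is_valid_seq_py is_valid_seq_py is_valid_seq_py_alt
  set f := seq.filter (fun c => c ≠ ".") with hfdef
  set vals := PySem.List.sorted f (fun x => x) false with hv
  have hperm : vals.Perm f := PySem.List.sorted_perm f (fun x => x) false
  have hle : vals.Pairwise (· ≤ ·) := PySem.List.sorted_pairwise f (fun x => x)
  have hA : isValidLoopA seq PySem.Set.empty = true ↔ f.Nodup := by
    rw [isValidLoopA_iff]
    simp [PySem.Set.empty, hfdef]
  have hB : ((vals.zip (vals.drop 1)).all (fun p => p.1 != p.2) = true) ↔ f.Nodup := by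
    rw [zip_tail_all_iff_chain', chain'_ne_iff_nodup_of_sorted vals hle]
    exact hperm.nodup_iff
  rcases Bool.eq_false_or_eq_true (isValidLoopA seq PySem.Set.empty) with h | h <;>
    rcases Bool.eq_false_or_eq_true ((vals.zip (vals.drop 1)).all (fun p => p.1 != p.2)) with h2 | h2 <;>
    simp_all
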